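-- pv_equiv track=rewrite | github.com/posl/comment_recommendation | script/split_gen/2_time/zh/120_A/5.py | search
-- ===== SOURCE A (Python) =====
-- def search(a,b,query):
--     a = list(map(int, a))
--     b = list(map(int, b))
--     query = list(map(int, query))
--     result = []
--     for q in query:
--         a.append(q)
--         b.append(q)
--         a.sort()
--         b.sort()
--         aindex = a.index(q)
--         bindex = b.index(q)
--         if aindex == 0:
--             amin = a[aindex]
--         else:
--             amin = q - a[aindex-1]
--         if bindex == 0:
--             bmin = b[bindex]
--         else:
--             bmin = q - b[bindex-1]
--         result.append(min(amin,bmin))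
--     return result
-- ===== SOURCE B (Python) =====
-- def _pred(vals, q):
--     # largest element strictly less than q, or None
--     best = None
--     for x in vals:
--         if x < q and (best is None or best < x):
--             best = x
--     return best
--
-- def search(a, b, query):
--     xs = [int(v) for v in a]
--     ys = [int(v) for v in b]
--     out = []
--     for q in query:
--         q = int(q)
--         pa = _pred(xs, q)
--         pb = _pred(ys, q)
--         amin = q if pa is None else q - pa
--         bmin = q if pb is None else q - pb
--         out.append(min(amin, bmin))
--         xs.append(q)
--         ys.append(q)
--     return out
-- ===== Notes on version B (the rewrite author's own statement) =====
-- stated objective: simpler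
-- what changed: Instead of appending q, fully re-sorting both lists and using list.index to locate q each query, B keeps the lists unsorted and finds the largest element strictly below q with one linear scan per list.
import Mathlib
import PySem

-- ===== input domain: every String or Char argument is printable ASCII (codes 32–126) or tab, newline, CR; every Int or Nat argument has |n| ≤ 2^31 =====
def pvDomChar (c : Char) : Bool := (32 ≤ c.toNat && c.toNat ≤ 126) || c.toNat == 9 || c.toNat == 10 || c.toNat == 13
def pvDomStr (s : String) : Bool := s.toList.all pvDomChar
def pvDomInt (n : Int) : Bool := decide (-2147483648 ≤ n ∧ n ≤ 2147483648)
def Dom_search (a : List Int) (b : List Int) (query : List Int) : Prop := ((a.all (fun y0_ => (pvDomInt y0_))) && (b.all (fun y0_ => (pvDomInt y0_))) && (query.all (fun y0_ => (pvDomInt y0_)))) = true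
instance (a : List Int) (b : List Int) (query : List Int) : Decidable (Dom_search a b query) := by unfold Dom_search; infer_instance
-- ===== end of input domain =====

-- B replaces A's per-query full re-sort + list.index with a single linear scan for the
-- largest element strictly below q (objective: simpler — the sorting and indexing disappear).


-- ===== PORT A =====
-- one loop iteration of A: append q to both lists, sort both, locate q, take the gap
def searchStep (st : List Int × List Int × List Int) (q : Int) : List Int × List Int × List Int :=
  let a := PySem.List.sorted (st.1 ++ [q]) (fun x => x) false
  let b := PySem.List.sorted (st.2.1 ++ [q]) (fun x => x) false
  let aindex : Int := ((PySem.List.index? a q).getD 0 : Nat)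
  let bindex : Int := ((PySem.List.index? b q).getD 0 : Nat)
  let amin := if aindex = 0 then (PySem.List.pyGet? a aindex).getD 0
              else q - (PySem.List.pyGet? a (aindex - 1)).getD 0
  let bmin := if bindex = 0 then (PySem.List.pyGet? b bindex).getD 0
              else q - (PySem.List.pyGet? b (bindex - 1)).getD 0
  (a, b, st.2.2 ++ [min amin bmin])

-- list(map(int, ·)) on a List Int is the identity map
def search (a : List Int) (b : List Int) (query : List Int) : List Int :=
  let a := a.map (fun x => x)
  let b := b.map (fun x => x)
  let query := query.map (fun x => x)
  (query.foldl searchStep (a, b, ([] : List Int))).2.2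

-- ===== PORT B =====
-- helper _pred's loop body: keep the best (largest) element seen so far that is < q
def predStep (q : Int) (best : Option Int) (x : Int) : Option Int :=
  match best with
  | none => if x < q then some x else none
  | some p => if x < q ∧ p < x then some x else some p

-- helper _pred: largest element of vals strictly less than q (none if there is none)
def predLt (vals : List Int) (q : Int) : Option Int :=
  vals.foldl (predStep q) none

def altStep (st : List Int × List Int × List Int) (q : Int) : List Int × List Int × List Int :=
  let amin := match predLt st.1 q with | none => q | some p => q - p
  let bmin := match predLt st.2.1 q with | none => q | some p => q - p
  (st.1 ++ [q], st.2.1 ++ [q], st.2.2 ++ [min amin bmin])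

def search_alt (a : List Int) (b : List Int) (query : List Int) : List Int :=
  let xs := a.map (fun v => v)
  let ys := b.map (fun v => v)
  (query.foldl altStep (xs, ys, ([] : List Int))).2.2

-- ===== PRECONDITION & SPEC =====
def Spec_search (a : List Int) (b : List Int) (query : List Int) (out : List Int) : Prop := out = search_alt a b query
instance (a : List Int) (b : List Int) (query : List Int) (out : List Int) : Decidable (Spec_search a b query out) := by unfold Spec_search; infer_instance

-- ===== CLAIM (what is proved, stated in full; the proofs are below) =====
def Claim_equal_search : Prop := ∀ (a : List Int) (b : List Int) (query : List Int), Dom_search a b query → Spec_search a b query (search a b query)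

-- ===== LEMMAS AND PROOFS =====

theorem foldl_pred_none (q : Int) (l : List Int) : ∀ (acc : Option Int),
    l.foldl (predStep q) acc = none ↔ acc = none ∧ ∀ x ∈ l, ¬ x < q := by
  induction l with
  | nil => intro acc; simp
  | cons x t ih =>
    intro acc
    simp only [List.foldl_cons, ih, List.mem_cons]
    constructor
    · rintro ⟨h1, h2⟩
      cases acc with
      | none =>
        by_cases hx : x < q
        · simp [predStep, hx] at h1
        · exact ⟨rfl, by rintro y (rfl | hy); exact hx; exact h2 y hy⟩
      | some p => simp [predStep] at h1; split at h1 <;> simp_all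
    · rintro ⟨rfl, h⟩
      have hx : ¬ x < q := h x (Or.inl rfl)
      exact ⟨by simp [predStep, hx], fun y hy => h y (Or.inr hy)⟩

theorem foldl_pred_some (q : Int) (l : List Int) : ∀ (acc : Option Int) (p : Int),
    (∀ b, acc = some b → b < q) →
    l.foldl (predStep q) acc = some p →
    (p ∈ l ∨ acc = some p) ∧ p < q ∧ (∀ x ∈ l, x < q → x ≤ p) ∧ (∀ b, acc = some b → b ≤ p) := by
  induction l with
  | nil =>
    intro acc p hacc h
    simp at h
    refine ⟨Or.inr h, hacc p h, by simp, fun b hb => ?_⟩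
    rw [h] at hb; cases hb; exact le_refl _
  | cons x t ih =>
    intro acc p hacc h
    simp only [List.foldl_cons] at h
    have hstep : ∀ b, predStep q acc x = some b → b < q := by
      intro b hb
      cases acc with
      | none =>
        by_cases hx : x < q
        · simp [predStep, hx] at hb; cases hb; exact hx
        · simp [predStep, hx] at hb
      | some c =>
        by_cases hx : x < q ∧ c < x
        · simp [predStep, hx] at hb; cases hb; exact hx.1
        · simp [predStep, hx] at hb; exact hb ▸ hacc c rfl
    have ⟨hmem, hlt, hmax, hge⟩ := ih (predStep q acc x) p hstep h
    refine ⟨?_, hlt, ?_, ?_⟩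
    · rcases hmem with hm | hm
      · exact Or.inl (List.mem_cons_of_mem _ hm)
      · cases acc with
        | none =>
          by_cases hx : x < q
          · simp [predStep, hx] at hm; cases hm; exact Or.inl (by simp)
          · simp [predStep, hx] at hm
        | some c =>
          by_cases hx : x < q ∧ c < x
          · simp [predStep, hx] at hm; cases hm; exact Or.inl (by simp)
          · simp [predStep, hx] at hm; cases hm; exact Or.inr rfl
    · intro y hy hylt
      rcases List.mem_cons.mp hy with rfl | hyt
      · cases acc with
        | none => exact hge y (by simp [predStep, hylt])
        | some c =>
          by_cases hcx : c < y
          · exact hge y (by simp [predStep, hylt, hcx])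
          · have := hge c (by simp [predStep, hylt, hcx]); omega
      · exact hmax y hyt hylt
    · intro b hb
      cases acc with
      | none => simp at hb
      | some c =>
        cases hb
        by_cases hcx : b < x ∧ x < q
        · have := hge x (by simp [predStep, hcx.2, hcx.1]); omega
        · have : predStep q (some b) x = some b := by
            simp [predStep]; intro h1 h2; exact absurd ⟨h2, h1⟩ hcx
          exact hge b this

theorem predLt_none_iff (l : List Int) (q : Int) :
    predLt l q = none ↔ ∀ x ∈ l, ¬ x < q := by
  unfold predLt
  rw [foldl_pred_none]
  simp

theorem predLt_some (l : List Int) (q : Int) (p : Int) (h : predLt l q = some p) :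
    p ∈ l ∧ p < q ∧ ∀ x ∈ l, x < q → x ≤ p := by
  have ⟨hm, hlt, hmax, _⟩ := foldl_pred_some q l none p (by simp) h
  exact ⟨hm.resolve_right (by simp), hlt, hmax⟩

theorem predLt_perm (l l' : List Int) (q : Int) (h : l.Perm l') :
    predLt l q = predLt l' q := by
  have mem : ∀ x, x ∈ l ↔ x ∈ l' := fun x => h.mem_iff
  cases hl : predLt l q with
  | none =>
    cases hl' : predLt l' q with
    | none => rfl
    | some p =>
      have ⟨hm, hlt, _⟩ := predLt_some l' q p hl'
      exact absurd hlt ((predLt_none_iff l q).mp hl p ((mem p).mpr hm))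
  | some p =>
    cases hl' : predLt l' q with
    | none =>
      have ⟨hm, hlt, _⟩ := predLt_some l q p hl
      exact absurd hlt ((predLt_none_iff l' q).mp hl' p ((mem p).mp hm))
    | some p' =>
      have ⟨hm, hlt, hmax⟩ := predLt_some l q p hl
      have ⟨hm', hlt', hmax'⟩ := predLt_some l' q p' hl'
      have h1 := hmax p' ((mem p').mpr hm') hlt'
      have h2 := hmax' p ((mem p).mp hm) hlt
      exact congrArg some (le_antisymm h2 h1)

-- per-query value computed by A's step, resp. B's step (proof-only names)
def stepValA (l : List Int) (q : Int) : Int :=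
  if (((PySem.List.index? (PySem.List.sorted (l ++ [q]) (fun x => x) false) q).getD 0 : Nat) : Int) = 0 then
    (PySem.List.pyGet? (PySem.List.sorted (l ++ [q]) (fun x => x) false)
      (((PySem.List.index? (PySem.List.sorted (l ++ [q]) (fun x => x) false) q).getD 0 : Nat) : Int)).getD 0
  else q - (PySem.List.pyGet? (PySem.List.sorted (l ++ [q]) (fun x => x) false)
      ((((PySem.List.index? (PySem.List.sorted (l ++ [q]) (fun x => x) false) q).getD 0 : Nat) : Int) - 1)).getD 0

def stepValB (l : List Int) (q : Int) : Int :=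
  match predLt l q with | none => q | some p => q - p

theorem searchStep_eq (st : List Int × List Int × List Int) (q : Int) :
    searchStep st q = (PySem.List.sorted (st.1 ++ [q]) (fun x => x) false,
      PySem.List.sorted (st.2.1 ++ [q]) (fun x => x) false,
      st.2.2 ++ [min (stepValA st.1 q) (stepValA st.2.1 q)]) := rfl

theorem altStep_eq (st : List Int × List Int × List Int) (q : Int) :
    altStep st q = (st.1 ++ [q], st.2.1 ++ [q],
      st.2.2 ++ [min (stepValB st.1 q) (stepValB st.2.1 q)]) := rfl

theorem stepValB_perm (l l' : List Int) (q : Int) (h : l.Perm l') :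
    stepValB l q = stepValB l' q := by
  unfold stepValB; rw [predLt_perm l l' q h]

-- the sorted list A builds is exactly (elements < q) ++ q :: (elements ≥ q)
theorem sorted_append_singleton (l : List Int) (q : Int) :
    PySem.List.sorted (l ++ [q]) (fun x => x) false =
      (PySem.List.sorted l (fun x => x) false).filter (fun x => decide (x < q)) ++
      q :: (PySem.List.sorted l (fun x => x) false).filter (fun x => !decide (x < q)) := by
  set L := PySem.List.sorted l (fun x => x) false with hL
  set lo := L.filter (fun x => decide (x < q)) with hlo
  set hi := L.filter (fun x => !decide (x < q)) with hhi
  apply PySem.List.sorted_id_eq_of_perm_of_pairwise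
  · refine List.Perm.trans List.perm_middle ?_
    refine List.Perm.trans ((List.filter_append_perm _ L).cons q) ?_
    refine List.Perm.trans ((PySem.List.sorted_perm l (fun x => x) false).cons q) ?_
    exact (List.perm_append_singleton q l).symm
  · have hpw : L.Pairwise (fun a b => a ≤ b) := PySem.List.sorted_pairwise l (fun x => x)
    rw [List.pairwise_append]
    refine ⟨hpw.filter _, ?_, ?_⟩
    · rw [List.pairwise_cons]
      refine ⟨?_, hpw.filter _⟩
      intro b hb
      have := (List.mem_filter.mp hb).2
      simp at this; omega
    · intro x hx b hb
      have hxq := (List.mem_filter.mp hx).2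
      simp at hxq
      rcases List.mem_cons.mp hb with rfl | hb'
      · omega
      · have := (List.mem_filter.mp hb').2
        simp at this; omega

theorem mem_lo_iff (l : List Int) (q : Int) (x : Int) :
    x ∈ (PySem.List.sorted l (fun x => x) false).filter (fun x => decide (x < q)) ↔
      x ∈ l ∧ x < q := by
  rw [List.mem_filter, PySem.List.mem_sorted]
  simp

-- the core step agreement: on ANY list state, A's sorted/index gap equals B's scan gap
theorem step_val_eq (l : List Int) (q : Int) : stepValA l q = stepValB l q := by
  unfold stepValA stepValB
  rw [sorted_append_singleton]
  set L := PySem.List.sorted l (fun x => x) false with hL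
  set lo := L.filter (fun x => decide (x < q)) with hlo
  set hi := L.filter (fun x => !decide (x < q)) with hhi
  have hqlo : q ∉ lo := by
    intro h
    have := (List.mem_filter.mp h).2
    simp at this
  have hidx : PySem.List.index? (lo ++ q :: hi) q = some lo.length := by
    rw [PySem.List.index?_eq_some_iff]
    exact ⟨lo, hi, rfl, rfl, hqlo⟩
  rw [hidx]
  simp only [Option.getD_some]
  rcases List.eq_nil_or_concat lo with hnil | ⟨lo', p, hcons⟩
  · -- no element below q
    have hnone : predLt l q = none := by
      rw [predLt_none_iff]
      intro x hx hxq
      have : x ∈ lo := (mem_lo_iff l q x).mpr ⟨hx, hxq⟩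
      rw [hnil] at this; simp at this
    rw [hnone, hnil]
    simp [PySem.List.pyGet?, PySem.List.pyIdx?]
  · -- p = last element below q = the predecessor
    rw [List.concat_eq_append] at hcons
    have hlen : (lo.length : Int) ≠ 0 := by rw [hcons]; simp; omega
    rw [if_neg hlen]
    have hget : (PySem.List.pyGet? (lo ++ q :: hi) ((lo.length : Int) - 1)).getD 0 = p := by
      have h1 : ((lo.length : Int)) - 1 = ((lo'.length : Nat) : Int) := by
        rw [hcons]; simp
      rw [h1, PySem.List.pyGet?_natCast, hcons, List.append_assoc,
        List.getElem?_append_right (le_refl lo'.length)]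
      simp
    rw [hget]
    have hplo : p ∈ lo := by rw [hcons]; simp
    have hpmax : ∀ x ∈ lo, x ≤ p := by
      intro x hx
      have hpw : lo.Pairwise (fun a b => a ≤ b) :=
        (PySem.List.sorted_pairwise l (fun x => x)).filter _
      rw [hcons] at hx hpw
      rw [List.pairwise_append] at hpw
      rcases List.mem_append.mp hx with hx' | hx'
      · exact hpw.2.2 x hx' p (by simp)
      · simp at hx'; omega
    have hpl := (mem_lo_iff l q p).mp hplo
    cases hp : predLt l q with
    | none =>
      exact absurd hpl.2 ((predLt_none_iff l q).mp hp p hpl.1)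
    | some p' =>
      have ⟨hm', hlt', hmax'⟩ := predLt_some l q p' hp
      have h1 : p ≤ p' := hmax' p hpl.1 hpl.2
      have h2 : p' ≤ p := hpmax p' ((mem_lo_iff l q p').mpr ⟨hm', hlt'⟩)
      simp only []
      omega

theorem fold_eq (qs : List Int) : ∀ (aA bA aB bB out : List Int),
    aA.Perm aB → bA.Perm bB →
    (qs.foldl searchStep (aA, bA, out)).2.2 = (qs.foldl altStep (aB, bB, out)).2.2 := by
  induction qs with
  | nil => intro _ _ _ _ _ _ _; rfl
  | cons q t ih =>
    intro aA bA aB bB out hA hB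
    simp only [List.foldl_cons, searchStep_eq, altStep_eq]
    rw [step_val_eq aA q, step_val_eq bA q, stepValB_perm aA aB q hA, stepValB_perm bA bB q hB]
    exact ih _ _ _ _ _
      ((PySem.List.sorted_perm _ _ _).trans (hA.append_right [q]))
      ((PySem.List.sorted_perm _ _ _).trans (hB.append_right [q]))

-- ===== VERDICT (by name: the statement is the Claim_ definition above) =====
theorem search_spec : Claim_equal_search := by
  intro a b query _
  unfold Spec_search search search_alt
  simp only [List.map_id_fun', id]
  exact fold_eq query a b a b [] (List.Perm.refl a) (List.Perm.refl b)
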